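-- pv_equiv track=rewrite | github.com/bsoist/codesignal-arcade-solutions | 0_intro/057_file_naming.py | solution
-- ===== SOURCE A (Python) =====
-- def solution(names):
--     used = set()
--     files = []
--     for name in names:
--         i, test_name = 0, name
--         while test_name in used:
--             i += 1
--             test_name = f'{name}({i})'
--         files.append(test_name)
--         used.add(test_name)
--     return files
-- ===== SOURCE B (Python) =====
-- def solution(names):
--     used = set()
--     next_idx = {}
--     files = []
--     for name in names:
--         if name not in used:
--             used.add(name)
--             files.append(name)
--         else:
--             i = next_idx.get(name, 1)
--             while f'{name}({i})' in used:
--                 i += 1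
--             new_name = f'{name}({i})'
--             used.add(new_name)
--             files.append(new_name)
--             next_idx[name] = i + 1
--     return files
-- ===== Notes on version B (the rewrite author's own statement) =====
-- stated objective: faster
-- what changed: Instead of rescanning suffixes from 1 for every duplicate, B memoizes in a dict the next suffix index to try per base name and resumes the scan there, so the total scanning work is amortized linear.
import Mathlib
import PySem

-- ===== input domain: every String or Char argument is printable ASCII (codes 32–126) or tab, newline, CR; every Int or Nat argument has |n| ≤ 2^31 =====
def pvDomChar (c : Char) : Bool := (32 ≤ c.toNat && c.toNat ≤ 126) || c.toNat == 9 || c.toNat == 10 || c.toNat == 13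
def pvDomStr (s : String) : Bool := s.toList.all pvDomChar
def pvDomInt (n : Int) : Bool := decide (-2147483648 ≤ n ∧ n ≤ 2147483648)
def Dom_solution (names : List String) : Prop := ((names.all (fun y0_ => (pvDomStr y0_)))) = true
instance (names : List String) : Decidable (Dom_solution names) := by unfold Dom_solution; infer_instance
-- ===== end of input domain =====

-- B replaces A's per-name rescan of suffixes from 1 by a dict memoizing, per base name,
-- the next suffix index to try, resuming the scan there (objective: faster, amortized linear scanning).

-- ===== PORT A =====
-- f'{name}({i})'
def pvFmt (name : String) (i : Int) : String :=
  String.ofList (name.toList ++ '(' :: PySem.Int.toChars i ++ [')'])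

-- A's `while test_name in used` loop; the fuel argument only makes it total: the caller
-- passes used.length + 1, which always suffices (pvScanA_finds below), so the 0 case is unreachable.
def pvScanA (name : String) (used : PySem.Set String) : Int → String → Nat → String
  | _, test, 0 => test
  | i, test, fuel + 1 =>
    if PySem.Set.contains used test then
      pvScanA name used (i + 1) (pvFmt name (i + 1)) fuel
    else test

def pvStepA (st : PySem.Set String × List String) (name : String) :
    PySem.Set String × List String :=
  let t := pvScanA name st.1 0 name (st.1.length + 1)
  (PySem.Set.add st.1 t, st.2 ++ [t])

def solution (names : List String) : List String :=
  (names.foldl pvStepA (PySem.Set.empty, [])).2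

-- ===== PORT B =====
-- B's `while f'{name}({i})' in used` loop, returning the first free index; fuel as in pvScanA.
def pvScanB (name : String) (used : PySem.Set String) : Int → Nat → Int
  | i, 0 => i
  | i, fuel + 1 =>
    if PySem.Set.contains used (pvFmt name i) then
      pvScanB name used (i + 1) fuel
    else i

def pvStepB (st : PySem.Set String × PySem.Dict String Int × List String) (name : String) :
    PySem.Set String × PySem.Dict String Int × List String :=
  if PySem.Set.contains st.1 name then
    let i := pvScanB name st.1 (st.2.1.getD name 1) (st.1.length + 1)
    (PySem.Set.add st.1 (pvFmt name i), st.2.1.insert name (i + 1), st.2.2 ++ [pvFmt name i])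
  else
    (PySem.Set.add st.1 name, st.2.1, st.2.2 ++ [name])

def solution_alt (names : List String) : List String :=
  (names.foldl pvStepB (PySem.Set.empty, PySem.Dict.empty, [])).2.2

-- ===== PRECONDITION & SPEC =====
def Spec_solution (names : List String) (out : List String) : Prop := out = solution_alt names
instance (names : List String) (out : List String) : Decidable (Spec_solution names out) := by unfold Spec_solution; infer_instance

-- ===== CLAIM (what is proved, stated in full; the proofs are below) =====
def Claim_equal_solution : Prop := ∀ (names : List String), Dom_solution names → Spec_solution names (solution names)

-- ===== LEMMAS AND PROOFS =====

-- the j-th candidate file name tried for a base name (j = 0 is the bare name)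
def pvCand (name : String) (j : Nat) : String :=
  if j = 0 then name else pvFmt name (j : Int)


-- the invariant carried through the fold: every memoized next-index in the dict
-- only skips candidates that are already used
def pvInv (u : List String) (nxt : PySem.Dict String Int) : Prop :=
  ∀ nm (v : Int), nxt.get? nm = some v →
    ∃ jn : Nat, v = (jn : Int) ∧ 1 ≤ jn ∧ ∀ t : Nat, 1 ≤ t → t < jn → pvCand nm t ∈ u

theorem pv_digitChar_inj (a b : Nat) (ha : a < 10) (hb : b < 10)
    (h : a.digitChar = b.digitChar) : a = b := by
  interval_cases a <;> interval_cases b <;> first | rfl | (exact absurd h (by decide))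

theorem pv_toDigits_inj : ∀ (m n : Nat), Nat.toDigits 10 m = Nat.toDigits 10 n → m = n := by
  intro m
  induction m using Nat.strong_induction_on with
  | _ m ih =>
    intro n h
    rw [Nat.toDigits_eq_if (n := m) (by norm_num)] at h; rw [Nat.toDigits_eq_if (n := n) (by norm_num)] at h
    by_cases hm : m < 10 <;> by_cases hn : n < 10
    · rw [if_pos hm, if_pos hn] at h
      exact pv_digitChar_inj _ _ hm hn (List.singleton_inj.mp h)
    · rw [if_pos hm, if_neg hn] at h
      have hl := congrArg List.length h
      simp only [List.length_singleton, List.length_append] at hl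
      have hp : 0 < (Nat.toDigits 10 (n / 10)).length := Nat.length_toDigits_pos
      omega
    · rw [if_neg hm, if_pos hn] at h
      have hl := congrArg List.length h
      simp only [List.length_singleton, List.length_append] at hl
      have hp : 0 < (Nat.toDigits 10 (m / 10)).length := Nat.length_toDigits_pos
      omega
    · rw [if_neg hm, if_neg hn] at h
      rw [← List.concat_eq_append, ← List.concat_eq_append] at h
      obtain ⟨h1, h2⟩ := List.concat_inj.mp h
      have hd : m / 10 = n / 10 := ih (m / 10) (Nat.div_lt_self (by omega) (by norm_num)) _ h1
      have hm2 : m % 10 = n % 10 :=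
        pv_digitChar_inj _ _ (Nat.mod_lt _ (by norm_num)) (Nat.mod_lt _ (by norm_num)) h2
      omega

theorem pv_toChars_natCast (j : Nat) : PySem.Int.toChars (j : Int) = Nat.toDigits 10 j := by
  simp [PySem.Int.toChars]

theorem pv_cand_inj (name : String) (j k : Nat) (h : pvCand name j = pvCand name k) : j = k := by
  have ht := congrArg String.toList h
  unfold pvCand at ht
  by_cases hj : j = 0 <;> by_cases hk : k = 0
  · omega
  · exfalso
    rw [if_pos hj, if_neg hk] at ht
    simp [pvFmt, String.toList_ofList] at ht
  · exfalso
    rw [if_neg hj, if_pos hk] at ht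
    simp [pvFmt, String.toList_ofList] at ht
  · rw [if_neg hj, if_neg hk] at ht
    simp only [pvFmt, String.toList_ofList] at ht
    rw [pv_toChars_natCast, pv_toChars_natCast, ← List.concat_eq_append, ← List.concat_eq_append] at ht
    have h1 := (List.concat_inj.mp ht).1
    have h2 := List.append_cancel_left h1
    exact pv_toDigits_inj _ _ (List.cons.inj h2).2

theorem pv_exists_free (name : String) (used : List String) :
    ∃ j, j ≤ used.length ∧ pvCand name j ∉ used := by
  by_contra hcon
  push Not at hcon
  have hsub : ((List.range (used.length + 1)).map (pvCand name)) ⊆ used := by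
    intro x hx
    simp only [List.mem_map, List.mem_range] at hx
    obtain ⟨j, hj, rfl⟩ := hx
    exact hcon j (by omega)
  have hnodup : ((List.range (used.length + 1)).map (pvCand name)).Nodup :=
    (List.nodup_range).map_on (fun a _ b _ hab => pv_cand_inj name a b hab)
  have hle : ((List.range (used.length + 1)).map (pvCand name)).length ≤ used.length := by
    calc _ = ((List.range (used.length + 1)).map (pvCand name)).toFinset.card :=
          (List.toFinset_card_of_nodup hnodup).symm
      _ ≤ used.toFinset.card := Finset.card_le_card (by
          intro x hx; rw [List.mem_toFinset] at hx ⊢; exact hsub hx)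
      _ ≤ used.length := List.toFinset_card_le used
  simp at hle

theorem pv_scanA_finds (name : String) (used : List String) (N : Nat)
    (hN : pvCand name N ∉ used) (hmin : ∀ m, m < N → pvCand name m ∈ used) :
    ∀ (fuel j : Nat), j ≤ N → N < j + fuel →
      pvScanA name used (j : Int) (pvCand name j) fuel = pvCand name N := by
  intro fuel
  induction fuel with
  | zero => intro j h1 h2; omega
  | succ fuel ih =>
    intro j h1 h2
    rw [pvScanA]
    by_cases hj : j = N
    · subst hj
      have : PySem.Set.contains used (pvCand name j) = false := by
        simp [PySem.Set.contains_eq_listContains]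
        simpa using hN
      rw [this]; simp
    · have hjN : j < N := by omega
      have hmem : PySem.Set.contains used (pvCand name j) = true := by
        simp [PySem.Set.contains_eq_listContains]
        simpa using hmin j hjN
      rw [hmem]
      simp only [if_true]
      have hcast : (j : Int) + 1 = ((j + 1 : Nat) : Int) := by push_cast; ring
      have hfmt : pvFmt name ((j : Int) + 1) = pvCand name (j + 1) := by
        rw [hcast]; simp [pvCand]
      rw [hfmt, hcast]
      exact ih (j + 1) (by omega) (by omega)

theorem pv_scanB_finds (name : String) (used : List String) (N : Nat)
    (hN : pvCand name N ∉ used) (hmin : ∀ m, m < N → pvCand name m ∈ used) :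
    ∀ (fuel j : Nat), 1 ≤ j → j ≤ N → N < j + fuel →
      pvScanB name used (j : Int) fuel = (N : Int) := by
  intro fuel
  induction fuel with
  | zero => intro j h0 h1 h2; omega
  | succ fuel ih =>
    intro j h0 h1 h2
    rw [pvScanB]
    have hfmt : pvFmt name (j : Int) = pvCand name j := by
      simp [pvCand]; intro hj; omega
    by_cases hj : j = N
    · subst hj
      have : PySem.Set.contains used (pvFmt name (j : Int)) = false := by
        rw [hfmt]
        simp [PySem.Set.contains_eq_listContains]
        simpa using hN
      rw [this]; simp
    · have hjN : j < N := by omega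
      have hmem : PySem.Set.contains used (pvFmt name (j : Int)) = true := by
        rw [hfmt]
        simp [PySem.Set.contains_eq_listContains]
        simpa using hmin j hjN
      rw [hmem]
      simp only [if_true]
      have hcast : (j : Int) + 1 = ((j + 1 : Nat) : Int) := by push_cast; ring
      rw [hcast]
      exact ih (j + 1) (by omega) (by omega) (by omega)

theorem pv_step_eq (u : List String) (nxt : PySem.Dict String Int) (out : List String)
    (name : String) (hinv : pvInv u nxt) :
    pvStepA (u, out) name = ((pvStepB (u, nxt, out) name).1, (pvStepB (u, nxt, out) name).2.2)
    ∧ pvInv (pvStepB (u, nxt, out) name).1 (pvStepB (u, nxt, out) name).2.1 := by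
  by_cases hmem : name ∈ u
  · -- name already used
    have hEx : ∃ j, pvCand name j ∉ u := by
      obtain ⟨j, _, hj⟩ := pv_exists_free name u; exact ⟨j, hj⟩
    set N := Nat.find hEx with hNdef
    have hNfree : pvCand name N ∉ u := Nat.find_spec hEx
    have hminN : ∀ m, m < N → pvCand name m ∈ u := by
      intro m hm
      have := Nat.find_min hEx hm
      exact not_not.mp this
    have hNle : N ≤ u.length := by
      obtain ⟨j, hjle, hj⟩ := pv_exists_free name u
      exact le_trans (Nat.find_min' hEx hj) hjle
    have hN1 : 1 ≤ N := by
      by_contra h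
      have h0 : N = 0 := by omega
      rw [h0] at hNfree
      simp [pvCand] at hNfree
      exact hNfree hmem
    have hAv : pvScanA name u 0 name (u.length + 1) = pvCand name N := by
      have := pv_scanA_finds name u N hNfree hminN (u.length + 1) 0 (by omega) (by omega)
      simpa [pvCand] using this
    have hcontains : PySem.Set.contains u name = true := by
      simp [PySem.Set.contains_eq_listContains]; simpa using hmem
    -- the memoized start index
    obtain ⟨jn, hjn1, hjnused, hgetD⟩ :
        ∃ jn : Nat, 1 ≤ jn ∧ (∀ t : Nat, 1 ≤ t → t < jn → pvCand name t ∈ u) ∧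
          nxt.getD name 1 = (jn : Int) := by
      cases hase : nxt.get? name with
      | none =>
        refine ⟨1, le_refl 1, ?_, ?_⟩
        · intro t ht1 ht2; omega
        · rw [PySem.Dict.getD_eq_get?_getD, hase]; rfl
      | some v =>
        obtain ⟨jn, rfl, h1, h2⟩ := hinv name v hase
        exact ⟨jn, h1, h2, by rw [PySem.Dict.getD_eq_get?_getD, hase]; rfl⟩
    have hjnN : jn ≤ N := by
      by_contra hlt
      exact hNfree (hjnused N hN1 (by omega))
    have hBv : pvScanB name u ((jn : Nat) : Int) (u.length + 1) = (N : Int) :=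
      pv_scanB_finds name u N hNfree hminN (u.length + 1) jn hjn1 hjnN (by omega)
    have hfmtN : pvFmt name ((N : Nat) : Int) = pvCand name N := by
      simp [pvCand]; intro h; omega
    constructor
    · simp only [pvStepA, pvStepB, hcontains, if_true]
      rw [hgetD, hBv, hAv, hfmtN]
    · simp only [pvStepB, hcontains, if_true]
      rw [hgetD, hBv]
      intro nm v hget
      by_cases hnm : nm = name
      · subst hnm
        rw [PySem.Dict.get?_insert_self] at hget
        have hv : v = (N : Int) + 1 := (Option.some_inj.mp hget).symm
        refine ⟨N + 1, by rw [hv]; push_cast; ring, by omega, ?_⟩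
        intro t ht1 ht2
        rw [PySem.Set.mem_add]
        by_cases htN : t = N
        · right; rw [htN, hfmtN]
        · left; exact hminN t (by omega)
      · rw [PySem.Dict.get?_insert_of_ne nxt _ hnm] at hget
        obtain ⟨jn', h1, h2, h3⟩ := hinv nm v hget
        exact ⟨jn', h1, h2, fun t ht1 ht2 => (PySem.Set.mem_add _ _ _).mpr (Or.inl (h3 t ht1 ht2))⟩
  · -- fresh name
    have hcontains : PySem.Set.contains u name = false := by
      simp [PySem.Set.contains_eq_listContains]; simpa using hmem
    have hAv : pvScanA name u 0 name (u.length + 1) = name := by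
      rw [pvScanA, hcontains]; simp
    constructor
    · simp only [pvStepA, pvStepB, hcontains, if_false, Bool.false_eq_true]
      rw [hAv]
    · simp only [pvStepB, hcontains, if_false, Bool.false_eq_true]
      intro nm v hget
      obtain ⟨jn', h1, h2, h3⟩ := hinv nm v hget
      exact ⟨jn', h1, h2, fun t ht1 ht2 => (PySem.Set.mem_add _ _ _).mpr (Or.inl (h3 t ht1 ht2))⟩

theorem pv_fold_eq : ∀ (names : List String) (u : List String) (nxt : PySem.Dict String Int)
    (out : List String), pvInv u nxt →
    (names.foldl pvStepA (u, out)) =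
      ((names.foldl pvStepB (u, nxt, out)).1, (names.foldl pvStepB (u, nxt, out)).2.2) := by
  intro names
  induction names with
  | nil => intro u nxt out _; rfl
  | cons name rest ih =>
    intro u nxt out hinv
    simp only [List.foldl_cons]
    obtain ⟨heq, hinv'⟩ := pv_step_eq u nxt out name hinv
    rw [heq]
    have hre : ((pvStepB (u, nxt, out) name).1, (pvStepB (u, nxt, out) name).2.1,
        (pvStepB (u, nxt, out) name).2.2) = pvStepB (u, nxt, out) name := rfl
    have := ih (pvStepB (u, nxt, out) name).1 (pvStepB (u, nxt, out) name).2.1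
      (pvStepB (u, nxt, out) name).2.2 hinv'
    rw [hre] at this
    exact this

-- ===== VERDICT (by name: the statement is the Claim_ definition above) =====
theorem solution_spec : Claim_equal_solution := by
  intro names _
  unfold Spec_solution solution solution_alt
  have h := pv_fold_eq names [] PySem.Dict.empty [] (by
    intro nm v hv; simp [PySem.Dict.get?_empty] at hv)
  rw [show (PySem.Set.empty : List String) = [] from rfl] at *
  rw [h]
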